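-- pv_equiv track=rewrite | github.com/jonasrenault/advent | advent/advent2025/day06.py | solve_vert
-- ===== SOURCE A (Python) =====
-- from functools import reduce
-- from operator import mul
--
-- def solve_vert(lines: list[str]) -> int:
--     res = []
--     operands = lines[:-1]
--     operators = lines[-1]
--     split_indices = [idx for idx, op in enumerate(operators) if op != " "]
--     for i in range(len(split_indices)):
--         op_idx = split_indices[i]
--         op = operators[op_idx]
--         next_op_idx = (
--             split_indices[i + 1] - 1 if i < len(split_indices) - 1 else len(operators)
--         )
--         values = [line[op_idx:next_op_idx] for line in operands]
--         vert_values = []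
--         for j in range(len(values[0])):
--             vert_values.append(int("".join([val[j] for val in values])))
--
--         if op == "*":
--             res.append(reduce(mul, vert_values, 1))
--         else:
--             res.append(sum(vert_values))
--
--     return sum(res)
-- ===== SOURCE B (Python) =====
-- from functools import reduce
-- from operator import mul
--
--
-- def solve_vert(lines: list[str]) -> int:
--     # Recursive over the list of operator columns; each segment's value is
--     # folded directly into a running total, reading one vertical number per column.
--     *operands, operators = lines
--
--     def column(c: int) -> int:
--         return int("".join(line[c] for line in operands))
--
--     def go(splits: list[int]) -> int:
--         if not splits:
--             return 0
--         op, rest = splits[0], splits[1:]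
--         end = rest[0] - 1 if rest else len(operators)
--         nums = (column(c) for c in range(op, end))
--         seg = reduce(mul, nums, 1) if operators[op] == "*" else sum(nums)
--         return seg + go(rest)
--
--     return go([c for c, ch in enumerate(operators) if ch != " "])
-- ===== Notes on version B (the rewrite author's own statement) =====
-- stated objective: alternative
-- what changed: B recurses over the list of operator columns with a running total and a per-column reader int(''.join(line[c] for line in operands)), instead of A's index loop that re-slices every line per segment, re-transposes via join per digit position, and collects a result list; Pre_ excludes inputs where A raises and the ragged inputs where the first operand line is shorter than a segment, on which A silently truncates the segment to the first line's width while B reads the whole segment and raises IndexError.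
-- outside the precondition, e.g. on solve_vert(['12', '345', '+  ']): A returns 37, B raises IndexError
import Mathlib
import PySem

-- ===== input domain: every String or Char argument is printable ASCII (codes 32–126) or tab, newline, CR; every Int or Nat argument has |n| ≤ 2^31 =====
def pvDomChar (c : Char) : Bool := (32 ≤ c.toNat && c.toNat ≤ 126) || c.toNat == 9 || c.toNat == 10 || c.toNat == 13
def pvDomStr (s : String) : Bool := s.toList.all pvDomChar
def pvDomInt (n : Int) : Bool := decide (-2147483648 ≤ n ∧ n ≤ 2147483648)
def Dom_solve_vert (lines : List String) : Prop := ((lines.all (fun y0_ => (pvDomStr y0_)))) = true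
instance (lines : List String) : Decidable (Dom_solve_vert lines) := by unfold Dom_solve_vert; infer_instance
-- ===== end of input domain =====

-- B recurses over the list of operator columns with a running total and a per-column
-- digit reader, instead of A's index loop re-slicing and re-transposing per segment
-- (objective: alternative decomposition, same cost).

-- ===== PORT A =====
-- '[idx for idx, op in enumerate(operators) if op != " "]'
def pvSplits (ops : List Char) : List Nat :=
  (List.range ops.length).filter (fun i => ops.getD i ' ' ≠ ' ')

-- 'split_indices[i+1] - 1 if i < len(split_indices) - 1 else len(operators)'
def pvSegEnd (splits : List Nat) (i olen : Nat) : Nat :=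
  if i < splits.length - 1 then splits.getD (i + 1) 0 - 1 else olen

def solve_vert (lines : List String) : Int :=
  let operands := (PySem.List.slice lines none (some (-1))).map String.toList
  let operators := ((PySem.List.pyGet? lines (-1)).getD "").toList
  let splits := pvSplits operators
  let res := (List.range splits.length).map (fun i =>
    let opIdx := splits.getD i 0
    let op := operators.getD opIdx ' '
    let nextIdx := pvSegEnd splits i operators.length
    let values := operands.map (fun line =>
      PySem.List.slice line (some (opIdx : Int)) (some (nextIdx : Int)))
    -- int("".join([val[j] for val in values])): the joined string IS the list of the j-th chars
    let verts := (List.range (values.headD []).length).map (fun j =>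
      (PySem.Int.ofChars? (values.map (fun v => v.getD j ' '))).getD 0)
    if op = '*' then verts.foldl (· * ·) 1 else verts.sum)
  res.sum

-- ===== PORT B =====
-- 'int("".join(line[c] for line in operands))' (total here; Pre_ excludes the raising inputs)
def pvColumn (operands : List (List Char)) (c : Nat) : Int :=
  (PySem.Int.ofChars? (operands.map (fun line => line.getD c ' '))).getD 0

-- the recursive 'go' over the remaining operator columns
def pvGo (operands : List (List Char)) (operators : List Char) : List Nat → Int
  | [] => 0
  | op :: rest =>
      let endd : Nat := match rest with | [] => operators.length | r :: _ => r - 1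
      let nums := (PySem.List.pyRange (op : Int) (endd : Int) 1).map
        (fun c => pvColumn operands c.toNat)
      let seg := if operators.getD op ' ' = '*' then nums.foldl (· * ·) 1 else nums.sum
      seg + pvGo operands operators rest

def solve_vert_alt (lines : List String) : Int :=
  let operands := (PySem.List.slice lines none (some (-1))).map String.toList
  let operators := ((PySem.List.pyGet? lines (-1)).getD "").toList
  pvGo operands operators (pvSplits operators)

-- ===== PRECONDITION & SPEC =====
-- column c exists on every operand line and parses with int()
def pvColOK (operands : List (List Char)) (c : Nat) : Prop :=
  (∀ l ∈ operands, c < l.length) ∧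
  PySem.Int.ofChars? (operands.map (fun l => l.getD c ' ')) ≠ none

-- Pre_ excludes the inputs where A raises (empty input, operators with no operand lines,
-- a missing or unparsable column inside a segment) and the ragged inputs where the first
-- operand line is shorter than a segment: there A silently truncates the segment to the
-- first line's width, while B reads the whole segment and raises IndexError.
def Pre_solve_vert (lines : List String) : Prop :=
  lines ≠ [] ∧
  (let operands := lines.dropLast.map String.toList
   let operators := (lines.getLastD "").toList
   let splits := pvSplits operators
   splits = [] ∨
     (operands ≠ [] ∧ ∀ i < splits.length, ∀ c,
        splits.getD i 0 ≤ c → c < pvSegEnd splits i operators.length →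
          pvColOK operands c))

instance (lines : List String) : Decidable (Pre_solve_vert lines) := by
  unfold Pre_solve_vert pvColOK; infer_instance

def pvWitness_solve_vert : List String := ["12", "34", "+ "]

def Spec_solve_vert (lines : List String) (out : Int) : Prop := out = solve_vert_alt lines
instance (lines : List String) (out : Int) : Decidable (Spec_solve_vert lines out) := by
  unfold Spec_solve_vert; infer_instance

-- ===== CLAIM (what is proved, stated in full; the proofs are below) =====
def Claim_equal_solve_vert : Prop := ∀ (lines : List String), Dom_solve_vert lines → Pre_solve_vert lines → Spec_solve_vert lines (solve_vert lines)

-- ===== LEMMAS AND PROOFS =====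

-- the j-th chars of the per-line slices ARE column a+j of the block
theorem pv_col_eq (P : List (List Char)) (a b j : Nat)
    (hjb : a + j < b) (hlen : ∀ l ∈ P, a + j < l.length) :
    (P.map (fun line => PySem.List.slice line (some (a : Int)) (some (b : Int)))).map
        (fun v => v.getD j ' ')
      = P.map (fun l => l.getD (a + j) ' ') := by
  rw [List.map_map]
  apply List.map_congr_left
  intro l hl
  have h1 := hlen l hl
  simp only [Function.comp, PySem.List.slice_natCast]
  rw [List.getD_eq_getElem?_getD, List.getD_eq_getElem?_getD,
      List.getElem?_take_of_lt (by omega), List.getElem?_drop]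

-- one segment: A's slice-then-transpose numbers ARE B's per-column reads over range(a, b)
theorem pv_seg_eq (h0 : List Char) (t : List (List Char)) (a b : Nat)
    (hseg : ∀ c, a ≤ c → c < b → pvColOK (h0 :: t) c) :
    (List.range (((h0 :: t).map (fun line => PySem.List.slice line (some (a:Int)) (some (b:Int)))).headD []).length).map
        (fun j => (PySem.Int.ofChars? (((h0 :: t).map (fun line => PySem.List.slice line (some (a:Int)) (some (b:Int)))).map (fun v => v.getD j ' '))).getD 0)
      = (PySem.List.pyRange (a : Int) (b : Int) 1).map (fun c => pvColumn (h0 :: t) c.toNat) := by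
  rw [PySem.List.pyRange_one, List.map_map]
  have hlen : (((h0 :: t).map (fun line => PySem.List.slice line (some (a:Int)) (some (b:Int)))).headD []).length
      = min b h0.length - a := by
    simp [PySem.List.slice_natCast]
    omega
  rw [hlen]
  by_cases hab : b ≤ a
  · have h1 : min b h0.length - a = 0 := by omega
    have h2 : ((b : Int) - (a : Int)).toNat = 0 := by omega
    rw [h1, h2]
    simp
  · have hb0 : b - 1 < h0.length := ((hseg (b - 1) (by omega) (by omega)).1 h0 (by simp)
    )
    have h1 : min b h0.length - a = b - a := by omega
    have h2 : ((b : Int) - (a : Int)).toNat = b - a := by omega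
    rw [h1, h2]
    apply List.map_congr_left
    intro j hj
    rw [List.mem_range] at hj
    obtain ⟨hcols, -⟩ := hseg (a + j) (by omega) (by omega)
    simp only [Function.comp_apply]
    have hcast : ((a : Int) + (j : Int)).toNat = a + j := by omega
    rw [hcast, pv_col_eq _ a b j (by omega) hcols]
    rfl

-- B's end for the head segment is A's pvSegEnd at index 0
theorem pv_segEnd_zero (op : Nat) (rest : List Nat) (olen : Nat) :
    pvSegEnd (op :: rest) 0 olen
      = (match rest with | [] => olen | r :: _ => r - 1) := by
  cases rest with
  | nil => simp [pvSegEnd]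
  | cons r rs => simp [pvSegEnd]

-- shifting A's segment-end bookkeeping past the head split
theorem pv_segEnd_cons (x : Nat) (rest : List Nat) (i olen : Nat) :
    pvSegEnd (x :: rest) (i + 1) olen = pvSegEnd rest i olen := by
  cases rest with
  | nil => simp [pvSegEnd]
  | cons r rs =>
      unfold pvSegEnd
      simp only [List.length_cons, List.getD_cons_succ]
      split_ifs with h1 h2 <;> first | rfl | omega

-- A's indexed map-then-sum over the splits equals B's structural recursion
theorem pv_go_eq (h0 : List Char) (t : List (List Char)) (O : List Char) :
    ∀ S : List Nat,
      (∀ i < S.length, ∀ c, S.getD i 0 ≤ c → c < pvSegEnd S i O.length → pvColOK (h0 :: t) c) →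
      ((List.range S.length).map (fun i =>
        let opIdx := S.getD i 0
        let op := O.getD opIdx ' '
        let nextIdx := pvSegEnd S i O.length
        let values := (h0 :: t).map (fun line =>
          PySem.List.slice line (some (opIdx : Int)) (some (nextIdx : Int)))
        let verts := (List.range (values.headD []).length).map (fun j =>
          (PySem.Int.ofChars? (values.map (fun v => v.getD j ' '))).getD 0)
        if op = '*' then verts.foldl (· * ·) 1 else verts.sum)).sum
      = pvGo (h0 :: t) O S := by
  intro S
  induction S with
  | nil => intro _; simp [pvGo]
  | cons op rest ih =>
      intro hcond
      rw [List.length_cons, List.range_succ_eq_map, List.map_cons, List.map_map, List.sum_cons]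
      show _ + _ = pvGo (h0 :: t) O (op :: rest)
      unfold pvGo
      congr 1
      · -- head segment
        simp only [List.getD_cons_zero]
        rw [← pv_segEnd_zero op rest O.length]
        have hseg := hcond 0 (by simp) -- : ∀ c, op ≤ c → c < pvSegEnd (op::rest) 0 _ → pvColOK _
        simp only [List.getD_cons_zero] at hseg
        rw [pv_seg_eq h0 t op (pvSegEnd (op :: rest) 0 O.length) hseg]
      · -- tail segments
        rw [← ih (fun i hi c h1 h2 => by
          have := hcond (i + 1) (by simpa using Nat.succ_lt_succ hi) c
          simp only [List.getD_cons_succ, pv_segEnd_cons] at this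
          exact this h1 h2)]
        apply congrArg List.sum
        apply List.map_congr_left
        intro i _
        simp only [Function.comp_apply, List.getD_cons_succ, pv_segEnd_cons]

-- ===== VERDICT (by name: the statement is the Claim_ definition above) =====
theorem solve_vert_spec : Claim_equal_solve_vert := by
  intro lines _ hpre
  obtain ⟨hne, hpre⟩ := hpre
  have hslice : PySem.List.slice lines none (some (-1)) = lines.dropLast :=
    PySem.List.slice_to_neg_one lines
  have hlast : (PySem.List.pyGet? lines (-1)).getD "" = lines.getLastD "" := by
    rw [PySem.List.pyGet?_neg_one, List.getLastD_eq_getLast?]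
  unfold Spec_solve_vert solve_vert solve_vert_alt
  simp only [hslice, hlast]
  revert hpre
  generalize (lines.getLastD "").toList = O
  generalize List.map String.toList lines.dropLast = P
  intro hpre
  by_cases hSnil : pvSplits O = []
  · simp [hSnil, pvGo]
  · obtain ⟨hPne, hbounds⟩ := hpre.resolve_left hSnil
    obtain ⟨h0, t, rfl⟩ : ∃ h0 t, P = h0 :: t := by
      cases P with
      | nil => exact absurd rfl hPne
      | cons h0 t => exact ⟨h0, t, rfl⟩
    exact pv_go_eq h0 t O (pvSplits O) hbounds
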